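-- pv_equiv track=rewrite | github.com/ozanyetkin/atb-course-2 | advent_of_code/day_10.py | syntax_resolver
-- ===== SOURCE A (Python) =====
-- mates = {")": "(", "]": "[", "}": "{", ">": "<"}
--
-- def syntax_resolver(input_str):
--     previous_char = ""
--     open_count = 0
--     for i, char in enumerate(input_str):
--         try:
--             if mates[char] != previous_char:
--                 return char
--             else:
--                 input_str = input_str[0 : i - 1] + input_str[i + 1 :]
--                 previous_char = char
--                 return syntax_resolver(input_str)
--         except KeyError:
--             open_count += 1
--             previous_char = char
--         if open_count == len(input_str):
--             return input_str
-- ===== SOURCE B (Python) =====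
-- mates = {")": "(", "]": "[", "}": "{", ">": "<"}
--
-- def syntax_resolver(input_str):
--     stack = []
--     for ch in input_str:
--         m = mates.get(ch)
--         if m is None:
--             stack.append(ch)
--         elif stack and stack[-1] == m:
--             stack.pop()
--         else:
--             return ch
--     return "".join(stack) if stack else None
-- ===== Notes on version B (the rewrite author's own statement) =====
-- stated objective: faster
-- what changed: replaces A's restart-from-scratch recursion with string slicing on every matched pair by a single left-to-right pass maintaining an explicit stack of unmatched opens
import Mathlib
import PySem

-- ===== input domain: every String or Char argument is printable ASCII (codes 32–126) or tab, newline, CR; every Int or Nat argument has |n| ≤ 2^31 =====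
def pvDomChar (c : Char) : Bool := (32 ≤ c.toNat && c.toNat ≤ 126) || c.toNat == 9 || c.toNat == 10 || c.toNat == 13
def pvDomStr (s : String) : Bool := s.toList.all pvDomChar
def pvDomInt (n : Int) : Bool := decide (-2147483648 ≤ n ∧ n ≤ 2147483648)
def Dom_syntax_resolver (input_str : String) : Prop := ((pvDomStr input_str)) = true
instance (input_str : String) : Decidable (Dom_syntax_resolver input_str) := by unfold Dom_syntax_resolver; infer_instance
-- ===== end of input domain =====

-- B replaces A's restart-from-scratch recursion (slice out each matched pair, recurse) by a
-- single left-to-right pass over the string with an explicit stack of unmatched opens.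

-- ===== PORT A =====
-- the module-level dict `mates`
def matesA : PySem.Dict Char String :=
  PySem.Dict.mk [(')', "("), (']', "["), ('}', "{"), ('>', "<")]

-- one call frame's `for i, char in enumerate(input_str)` loop; `full` is this frame's input_str;
-- `.inl r` = the frame returns r, `.inr s'` = `return syntax_resolver(s')` (done by the outer recursion)
def loopA (full : List Char) : List Char → Nat → String → Nat → Sum (Option String) (List Char)
  | [], _, _, _ => Sum.inl none   -- loop falls off the end: implicit `return None`
  | c :: rs, i, prev, oc =>
    match matesA.get? c with     -- `mates[char]`; none = KeyError, caught by the except branch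
    | some m =>
      if m ≠ prev then Sum.inl (some (String.ofList [c]))
      else
        -- input_str = input_str[0:i-1] + input_str[i+1:]; return syntax_resolver(input_str)
        Sum.inr (PySem.List.slice full (some 0) (some ((i : Int) - 1)) ++
                 PySem.List.slice full (some ((i : Int) + 1)) none)
    | none =>
      let oc' := oc + 1          -- open_count += 1 (previous_char = char is threaded below)
      if oc' = full.length then Sum.inl (some (String.ofList full))   -- `return input_str`
      else loopA full rs (i + 1) (String.ofList [c]) oc'

-- termination of A's recursion: the sliced string is strictly shorter (used by `decreasing_by`)
theorem loopA_inr_lt (rest : List Char) : ∀ (full : List Char) (i : Nat) (prev : String)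
    (oc : Nat) (s' : List Char), i + rest.length ≤ full.length → (i = 0 → prev = "") →
    loopA full rest i prev oc = Sum.inr s' → s'.length < full.length := by
  induction rest with
  | nil => intro full i prev oc s' _ _ h; simp [loopA] at h
  | cons c rs ih =>
    intro full i prev oc s' hlen h0 h
    rw [loopA] at h
    cases hm : matesA.get? c with
    | some m =>
      rw [hm] at h
      by_cases hne : m ≠ prev
      · simp [hne] at h
      · rw [not_ne_iff] at hne
        simp only [hne, ne_eq, not_true_eq_false, if_false, Sum.inr.injEq] at h
        -- m = prev; every value of `mates` is a nonempty string, so prev ≠ "" and hence 1 ≤ i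
        have hm' : m ≠ "" := by
          intro hcon; subst hcon
          simp only [matesA, PySem.Dict.get?_mk_cons] at hm
          split_ifs at hm <;> simp_all [PySem.Dict.get?]
        have hi : 1 ≤ i := by
          rcases Nat.eq_zero_or_pos i with h' | h'
          · exact absurd (hne.trans (h0 h')) hm'
          · exact h'
        have hcast : (i : Int) - 1 = ((i - 1 : Nat) : Int) := by omega
        have hcast2 : (i : Int) + 1 = ((i + 1 : Nat) : Int) := by push_cast; ring
        rw [hcast, hcast2, PySem.List.slice_zero_start, PySem.List.slice_to_natCast,
            PySem.List.slice_from_natCast] at h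
        subst h
        simp only [List.length_append, List.length_take, List.length_drop]
        simp only [List.length_cons] at hlen
        omega
    | none =>
      rw [hm] at h
      simp only at h
      by_cases he : oc + 1 = full.length
      · simp [he] at h
      · simp only [he, if_false] at h
        exact ih full (i + 1) (String.ofList [c]) (oc + 1) s'
          (by simp only [List.length_cons] at hlen; omega) (by omega) h

-- the top-level recursion `return syntax_resolver(input_str)`
def syntax_resolver_go (s : List Char) : Option String :=
  match h : loopA s s 0 "" 0 with
  | Sum.inl r => r
  | Sum.inr s' => syntax_resolver_go s'
termination_by s.length
decreasing_by exact loopA_inr_lt s s 0 "" 0 _ (by omega) (fun _ => rfl) h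

def syntax_resolver (input_str : String) : Option String :=
  syntax_resolver_go input_str.toList

-- ===== PORT B =====
-- `mates.get(ch)` on B's module dict, as a lookup function
def matesB (c : Char) : Option Char :=
  if c = ')' then some '(' else if c = ']' then some '[' else
  if c = '}' then some '{' else if c = '>' then some '<' else none

-- B's single pass: `for ch in input_str` with the stack kept in push order (append/pop at the right)
def loopB : List Char → List Char → Option String
  | [], stack => if stack.isEmpty then none else some (String.ofList stack)  -- ''.join(stack) / None
  | c :: rs, stack =>
    match matesB c with
    | none => loopB rs (stack ++ [c])          -- stack.append(ch)
    | some m =>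
      match stack.getLast? with                -- `stack and stack[-1] == m`
      | some t => if t = m then loopB rs stack.dropLast else some (String.ofList [c])
      | none => some (String.ofList [c])

def syntax_resolver_alt (input_str : String) : Option String :=
  loopB input_str.toList []

-- ===== PRECONDITION & SPEC =====
def Spec_syntax_resolver (input_str : String) (out : Option String) : Prop := out = syntax_resolver_alt input_str
instance (input_str : String) (out : Option String) : Decidable (Spec_syntax_resolver input_str out) := by unfold Spec_syntax_resolver; infer_instance

-- ===== CLAIM (what is proved, stated in full; the proofs are below) =====
def Claim_equal_syntax_resolver : Prop := ∀ (input_str : String), Dom_syntax_resolver input_str → Spec_syntax_resolver input_str (syntax_resolver input_str)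

-- ===== LEMMAS AND PROOFS =====

-- A's dict lookup and B's: same table, A stores the mate as a 1-char string
theorem mates_rel (c : Char) : matesA.get? c = (matesB c).map (fun m => String.ofList [m]) := by
  by_cases h1 : c = ')'; · subst h1; decide
  by_cases h2 : c = ']'; · subst h2; decide
  by_cases h3 : c = '}'; · subst h3; decide
  by_cases h4 : c = '>'; · subst h4; decide
  simp [matesA, matesB, PySem.Dict.get?,
        Ne.symm h1, Ne.symm h2, Ne.symm h3, Ne.symm h4, h1, h2, h3, h4]

theorem go_inl (s : List Char) (r : Option String) (h : loopA s s 0 "" 0 = Sum.inl r) :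
    syntax_resolver_go s = r := by
  unfold syntax_resolver_go
  split
  · simp_all
  · rename_i s2 heq; rw [h] at heq; cases heq

theorem go_inr (s s' : List Char) (h : loopA s s 0 "" 0 = Sum.inr s') :
    syntax_resolver_go s = syntax_resolver_go s' := by
  unfold syntax_resolver_go
  split
  · rename_i r heq; rw [h] at heq; cases heq
  · rename_i s2 heq; rw [h] at heq; cases heq; rw [← syntax_resolver_go]

-- the value of `previous_char` after A's loop has walked over `pre`
def prevAfter (pre : List Char) (prev : String) : String :=
  match pre.getLast? with
  | some t => String.ofList [t]
  | none => prev

theorem prevAfter_cons (c : Char) (pre : List Char) (prev : String) :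
    prevAfter (c :: pre) prev = prevAfter pre (String.ofList [c]) := by
  cases pre with
  | nil => rfl
  | cons d pr =>
    cases hpl : (d :: pr).getLast? with
    | none => simp at hpl
    | some t => simp [prevAfter, hpl]

-- A's loop walks over a prefix of non-closers without returning
theorem loopA_walk (pre : List Char) : ∀ (full rest : List Char) (i : Nat) (prev : String),
    (∀ c ∈ pre, matesA.get? c = none) → rest ≠ [] → i + pre.length + rest.length ≤ full.length →
    loopA full (pre ++ rest) i prev i = loopA full rest (i + pre.length) (prevAfter pre prev) (i + pre.length) := by
  induction pre with
  | nil => intro full rest i prev _ _ _; simp [prevAfter]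
  | cons c pr ih =>
    intro full rest i prev hopen hne hlen
    have hc : matesA.get? c = none := hopen c (by simp)
    have hstop : ¬ (i + 1 = full.length) := by
      have : rest.length ≥ 1 := by cases rest <;> simp_all
      simp only [List.length_cons] at hlen; omega
    rw [List.cons_append, loopA, hc]
    simp only [hstop, if_false]
    rw [ih full rest (i + 1) (String.ofList [c]) (fun d hd => hopen d (by simp [hd])) hne
        (by simp only [List.length_cons] at hlen ⊢; omega), prevAfter_cons]
    have : i + 1 + pr.length = i + (c :: pr).length := by simp; omega
    rw [this]

-- A's loop over an all-non-closer tail: returns the whole current string (or None when empty)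
theorem loopA_end (pre : List Char) : ∀ (full : List Char) (i : Nat) (prev : String),
    (∀ c ∈ pre, matesA.get? c = none) → i + pre.length = full.length →
    loopA full pre i prev i = Sum.inl (if pre.isEmpty then none else some (String.ofList full)) := by
  induction pre with
  | nil => intro full i prev _ _; simp [loopA]
  | cons c pr ih =>
    intro full i prev hopen hlen
    have hc : matesA.get? c = none := hopen c (by simp)
    rw [loopA, hc]
    simp only
    cases pr with
    | nil =>
      have : i + 1 = full.length := by simpa using hlen
      simp [this]
    | cons d pr' =>
      have hne : ¬ (i + 1 = full.length) := by simp only [List.length_cons] at hlen; omega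
      rw [if_neg hne, ih full (i + 1) (String.ofList [c]) (fun e he => hopen e (by simp [he]))
          (by simp only [List.length_cons] at hlen ⊢; omega)]
      simp

-- main invariant: A's whole computation on stack ++ rest equals B's loop state (rest, stack)
theorem go_eq_loopB (n : Nat) : ∀ (stack rest : List Char),
    (stack ++ rest).length ≤ n → (∀ c ∈ stack, matesB c = none) →
    syntax_resolver_go (stack ++ rest) = loopB rest stack := by
  induction n with
  | zero =>
    intro stack rest hlen _
    simp only [List.length_append] at hlen
    have hs : stack = [] := List.length_eq_zero_iff.1 (by omega)
    have hr : rest = [] := List.length_eq_zero_iff.1 (by omega)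
    subst hs; subst hr
    rw [go_inl _ none (by simp [loopA])]; rfl
  | succ n ih =>
    intro stack rest hlen hstack
    have hstackA : ∀ c ∈ stack, matesA.get? c = none := by
      intro c hc; rw [mates_rel, hstack c hc]; rfl
    induction rest generalizing stack with
    | nil =>
      rw [List.append_nil]
      have := loopA_end stack stack 0 "" hstackA (by simp)
      rw [go_inl _ _ this]
      cases stack with
      | nil => rfl
      | cons c st => simp [loopB]
    | cons c rs ihr =>
      cases hm : matesB c with
      | none =>
        have hsplit : stack ++ c :: rs = (stack ++ [c]) ++ rs := by simp
        rw [hsplit, ihr (stack ++ [c]) (by simpa using hlen)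
            (by intro d hd; rcases List.mem_append.1 hd with h | h
                · exact hstack d h
                · simp only [List.mem_singleton] at h; subst h; exact hm)
            (by intro d hd; rcases List.mem_append.1 hd with h | h
                · exact hstackA d h
                · simp only [List.mem_singleton] at h; subst h; rw [mates_rel, hm]; rfl)]
        simp [loopB, hm]
      | some m =>
        have hmA : matesA.get? c = some (String.ofList [m]) := by rw [mates_rel, hm]; rfl
        have hwalk := loopA_walk stack (stack ++ c :: rs) (c :: rs) 0 "" hstackA (by simp)
          (by simp)
        simp only [Nat.zero_add] at hwalk
        rw [loopA, hmA] at hwalk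
        cases hlast : stack.getLast? with
        | none =>
          have hs : stack = [] := by simpa using hlast
          subst hs
          simp only [prevAfter, hlast] at hwalk
          have hne : String.ofList [m] ≠ "" := by
            intro h; exact absurd (congrArg String.toList h) (by simp)
          simp only [List.length_nil, hne, ne_eq, not_false_eq_true, if_true] at hwalk
          rw [go_inl _ _ hwalk]
          simp [loopB, hm]
        | some t =>
          have hstk : stack.dropLast ++ [t] = stack := List.dropLast_append_getLast? t hlast
          have hi : 1 ≤ stack.length := by
            rw [← hstk]; simp
          simp only [prevAfter, hlast] at hwalk
          by_cases htm : t = m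
          · -- matched pair: A slices it out and recurses; B pops
            subst htm
            have hslice1 : PySem.List.slice (stack ++ c :: rs) (some 0) (some ((stack.length : Int) - 1)) = stack.dropLast := by
              have hcast : (stack.length : Int) - 1 = ((stack.length - 1 : Nat) : Int) := by omega
              rw [hcast, PySem.List.slice_zero_start, PySem.List.slice_to_natCast,
                  List.take_append_of_le_length (by omega), ← List.dropLast_eq_take]
            have hslice2 : PySem.List.slice (stack ++ c :: rs) (some ((stack.length : Int) + 1)) none = rs := by
              have hcast : (stack.length : Int) + 1 = ((stack.length + 1 : Nat) : Int) := by push_cast; ring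
              rw [hcast, PySem.List.slice_from_natCast, List.drop_length_add_append 1]
              rfl
            simp only [ne_eq, not_true_eq_false, if_false, hslice1, hslice2] at hwalk
            rw [go_inr _ _ hwalk]
            have hlen' : (stack.dropLast ++ rs).length ≤ n := by
              simp only [List.length_append, List.length_dropLast] at *
              simp only [List.length_cons] at hlen
              omega
            rw [ih stack.dropLast rs hlen'
                (fun d hd => hstack d (List.mem_of_mem_dropLast hd))]
            simp [loopB, hm, hlast]
          · -- mismatch: both return the closer
            have hne : String.ofList [m] ≠ String.ofList [t] := by
              intro h
              exact htm (by simpa using (congrArg String.toList h).symm)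
            simp only [hne, ne_eq, not_false_eq_true, if_true] at hwalk
            rw [go_inl _ _ hwalk]
            simp [loopB, hm, hlast, htm]

-- ===== VERDICT (by name: the statement is the Claim_ definition above) =====
theorem syntax_resolver_spec : Claim_equal_syntax_resolver := by
  intro input_str _
  unfold Spec_syntax_resolver syntax_resolver syntax_resolver_alt
  exact go_eq_loopB input_str.toList.length [] input_str.toList (by simp) (by simp)
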